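-- pv_equiv track=rewrite | github.com/PabloCabreraR/Codewars | Python/7kyu/sumOfNumbersFrom0ToN.py | show_sequence
-- ===== SOURCE A (Python) =====
-- def show_sequence(n):
--     if (n < 0):
--         return (f'{n}<0')
--     elif (n == 0):
--         return ('0=0')
--     else:
--         answer = ''
--         counter = 0
--         for i in range(n+1):
--             answer += (f'{i}+')
--             counter += i
--         return answer[:-1] + (f' = {counter}')
-- ===== SOURCE B (Python) =====
-- def show_sequence(n):
--     if n < 0:
--         return f'{n}<0'
--     if n == 0:
--         return '0=0'
--     total = n * (n + 1) // 2
--     return '+'.join(str(i) for i in range(n + 1)) + f' = {total}'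
-- ===== Notes on version B (the rewrite author's own statement) =====
-- stated objective: simpler
-- what changed: Replaces A's fused accumulate-and-append loop (with the trailing-plus trim) by the Gauss closed-form total and a single join over the stringified range, so no accumulator state and no slice fix-up.
import Mathlib
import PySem

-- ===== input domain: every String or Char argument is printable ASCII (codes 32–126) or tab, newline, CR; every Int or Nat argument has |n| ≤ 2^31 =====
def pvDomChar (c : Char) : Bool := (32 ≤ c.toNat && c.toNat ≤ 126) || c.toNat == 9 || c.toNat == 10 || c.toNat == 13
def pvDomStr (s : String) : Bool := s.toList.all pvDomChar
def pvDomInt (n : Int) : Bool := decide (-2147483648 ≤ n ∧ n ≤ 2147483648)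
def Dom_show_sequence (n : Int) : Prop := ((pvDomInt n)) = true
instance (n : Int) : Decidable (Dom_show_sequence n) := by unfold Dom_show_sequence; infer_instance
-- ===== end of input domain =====

-- B replaces A's fused accumulate-and-append loop (plus trailing-'+' trim) by the
-- closed-form total n*(n+1)//2 and a single '+'.join — simpler decomposition, not faster.

-- ===== PORT A =====
def show_sequence (n : Int) : String :=
  if n < 0 then PySem.Int.toStr n ++ "<0"
  else if n = 0 then "0=0"
  else
    -- answer/counter accumulated over range(n+1), then answer[:-1] + f' = {counter}'
    let st := (PySem.List.pyRange 0 (n + 1) 1).foldl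
      (fun (st : String × Int) i => (st.1 ++ PySem.Int.toStr i ++ "+", st.2 + i)) ("", 0)
    PySem.Str.slice st.1 none (some (-1)) ++ " = " ++ PySem.Int.toStr st.2

-- ===== PORT B =====
def show_sequence_alt (n : Int) : String :=
  if n < 0 then PySem.Int.toStr n ++ "<0"
  else if n = 0 then "0=0"
  else
    let total := PySem.Int.floordiv (n * (n + 1)) 2
    PySem.Str.join "+" ((PySem.List.pyRange 0 (n + 1) 1).map PySem.Int.toStr)
      ++ " = " ++ PySem.Int.toStr total

-- ===== PRECONDITION & SPEC =====
def Spec_show_sequence (n : Int) (out : String) : Prop := out = show_sequence_alt n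
instance (n : Int) (out : String) : Decidable (Spec_show_sequence n out) := by unfold Spec_show_sequence; infer_instance

-- ===== CLAIM (what is proved, stated in full; the proofs are below) =====
def Claim_equal_show_sequence : Prop := ∀ (n : Int), Dom_show_sequence n → Spec_show_sequence n (show_sequence n)

-- ===== LEMMAS AND PROOFS =====

theorem pv_foldl_char (xs : List Int) (s : String) (c : Int) :
    (xs.foldl (fun (st : String × Int) i => (st.1 ++ PySem.Int.toStr i ++ "+", st.2 + i)) (s, c))
    = (s ++ String.ofList (xs.flatMap (fun i => PySem.Int.toChars i ++ ['+'])), c + xs.sum) := by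
  induction xs generalizing s c with
  | nil =>
    simp only [List.foldl_nil, List.flatMap_nil, List.sum_nil, Prod.ext_iff]
    exact ⟨String.ext (by simp), by ring⟩
  | cons x xs ih =>
    simp only [List.foldl_cons, List.flatMap_cons, List.sum_cons, ih, Prod.ext_iff]
    refine ⟨String.ext ?_, by ring⟩
    simp [← PySem.Int.toList_toStr]
theorem pv_dropLast_body (xs : List Int) (hx : xs ≠ []) :
    (xs.flatMap (fun i => PySem.Int.toChars i ++ ['+'])).dropLast
    = PySem.Chars.join ['+'] (xs.map PySem.Int.toChars) := by
  induction xs with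
  | nil => simp at hx
  | cons x xs ih =>
    cases xs with
    | nil => simp [PySem.Chars.join_singleton]
    | cons y ys =>
      have hne : ((y :: ys).flatMap (fun i => PySem.Int.toChars i ++ ['+'])) ≠ [] := by
        simp
      rw [List.flatMap_cons, List.dropLast_append_of_ne_nil hne, ih (by simp)]
      simp [PySem.Chars.join_cons_cons]

theorem pv_sum_pyRange (m : Nat) :
    (PySem.List.pyRange 0 ((m : Int) + 1) 1).sum * 2 = (m : Int) * ((m : Int) + 1) := by
  induction m with
  | zero => decide
  | succ k ih =>
    rw [show ((k + 1 : Nat) : Int) + 1 = ((k : Int) + 1) + 1 by push_cast; ring,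
      PySem.List.pyRange_one_succ_right (a := 0) (b := (k : Int) + 1) (by positivity)]
    simp only [List.sum_append, List.sum_cons, List.sum_nil]
    push_cast
    push_cast at ih
    nlinarith [ih]

theorem pv_nonempty_pyRange (n : Int) (h : 0 < n) :
    PySem.List.pyRange 0 (n + 1) 1 ≠ [] := by
  rw [PySem.List.pyRange_one_cons (by omega)]
  simp

-- ===== VERDICT (by name: the statement is the Claim_ definition above) =====
theorem show_sequence_spec : Claim_equal_show_sequence := by
  intro n _
  unfold Spec_show_sequence show_sequence show_sequence_alt
  by_cases h1 : n < 0
  · simp [h1]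
  · by_cases h2 : n = 0
    · simp [h2]
    · have hpos : 0 < n := by omega
      simp only [if_neg h1, if_neg h2]
      rw [pv_foldl_char]
      obtain ⟨m, rfl⟩ : ∃ m : Nat, n = (m : Int) := ⟨n.toNat, by omega⟩
      have hsum : (0 : Int) + (PySem.List.pyRange 0 ((m : Int) + 1) 1).sum
          = PySem.Int.floordiv ((m : Int) * ((m : Int) + 1)) 2 := by
        rw [PySem.Int.floordiv_eq_ediv_of_pos (by norm_num)]
        have := pv_sum_pyRange m
        omega
      apply String.ext
      simp only [String.toList_append, PySem.Str.toList_join]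
      rw [PySem.Str.slice_to_neg_one, hsum]
      congr 1
      have hbody := pv_dropLast_body (PySem.List.pyRange 0 ((m : Int) + 1) 1)
        (pv_nonempty_pyRange _ (by exact_mod_cast hpos))
      simp only [String.toList_append, String.toList_ofList]
      rw [show ("".toList : List Char) = [] from rfl, List.nil_append, hbody]
      simp [Function.comp_def, PySem.Int.toList_toStr]
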